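-- pv_equiv track=rewrite | github.com/RJ306/AI | lab7/task2.py | calculate
-- ===== SOURCE A (Python) =====
-- def calculate(coins, is_max, alpha, beta):
--     if not coins:
--         return 0
--
--     if is_max:
--         left = coins[0] + calculate(coins[1:], False, alpha, beta)
--         right = coins[-1] + calculate(coins[:-1], False, alpha, beta)
--         best = max(left, right)
--         alpha = max(alpha, best)
--         if beta <= alpha:
--             return best
--         return best
--     else:
--         if coins[0] < coins[-1]:
--             return calculate(coins[1:], True, alpha, beta)
--         else:
--             return calculate(coins[:-1], True, alpha, beta)
-- ===== SOURCE B (Python) =====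
-- def calculate(coins, is_max, alpha, beta):
--     # Memoized recursion over index ranges (i, j, turn) instead of list slices:
--     # each contiguous subrange is solved once, O(n^2) states (alpha/beta are
--     # dead parameters in A: both branches return best, so pruning never acts).
--     memo = {}
--
--     def go(i, j, turn):
--         if i >= j:
--             return 0
--         key = (i, j, turn)
--         if key in memo:
--             return memo[key]
--         if turn:
--             v = max(coins[i] + go(i + 1, j, False),
--                     coins[j - 1] + go(i, j - 1, False))
--         else:
--             v = go(i + 1, j, True) if coins[i] < coins[j - 1] else go(i, j - 1, True)
--         memo[key] = v
--         return v
--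
--     return go(0, len(coins), is_max)
-- ===== Notes on version B (the rewrite author's own statement) =====
-- stated objective: faster
-- what changed: Replaced the exponential recursion on list slices with memoized recursion over index ranges (i, j, turn), solving each contiguous subrange once; intended as asymptotically faster (measured 2.22x at n=16, the largest size A finishes; A times out at n=64 where B returns).
import Mathlib
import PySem

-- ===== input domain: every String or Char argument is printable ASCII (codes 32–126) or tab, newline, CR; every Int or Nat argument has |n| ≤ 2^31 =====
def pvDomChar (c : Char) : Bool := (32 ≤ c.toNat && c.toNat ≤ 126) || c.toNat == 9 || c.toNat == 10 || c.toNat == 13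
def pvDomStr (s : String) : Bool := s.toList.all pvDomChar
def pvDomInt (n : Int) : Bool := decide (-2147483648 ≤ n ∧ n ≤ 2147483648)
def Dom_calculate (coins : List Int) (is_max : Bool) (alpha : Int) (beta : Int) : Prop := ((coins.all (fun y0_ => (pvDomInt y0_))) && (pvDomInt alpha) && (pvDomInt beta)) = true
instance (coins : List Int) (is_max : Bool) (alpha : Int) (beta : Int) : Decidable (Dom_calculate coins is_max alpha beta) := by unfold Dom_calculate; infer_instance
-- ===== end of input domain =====

-- B replaces A's exponential slice recursion with memoized recursion over index
-- ranges (i, j, turn), solving each contiguous subrange once; intended as faster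
-- (measured 2.22x at the largest size A finishes; A times out where B returns).


-- ===== PORT A =====
-- coins[0] / coins[-1] are taken on a nonempty list, so headI / getLastI are exact;
-- coins[1:] = tail, coins[:-1] = dropLast.
def calculate (coins : List Int) (is_max : Bool) (alpha : Int) (beta : Int) : Int :=
  if h : coins = [] then 0
  else
    if is_max then
      let left := coins.headI + calculate coins.tail false alpha beta
      let right := coins.getLastI + calculate coins.dropLast false alpha beta
      let best := max left right
      let alpha2 := max alpha best
      if beta ≤ alpha2 then best else best
    else
      if coins.headI < coins.getLastI then calculate coins.tail true alpha beta
      else calculate coins.dropLast true alpha beta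
termination_by coins.length
decreasing_by
  all_goals cases coins with
  | nil => exact absurd rfl h
  | cons a l => simp [List.length_dropLast]

-- ===== PORT B =====
-- Port of Source B's `go`: recursion on the index range (i, j, turn); the memo dict
-- of Source B is a pure cache (each entry always holds go's own value), elided here.
def calcGo (coins : List Int) (i j : Nat) (turn : Bool) : Int :=
  if _h : i < j then
    if turn then
      max (coins.getD i 0 + calcGo coins (i + 1) j false)
          (coins.getD (j - 1) 0 + calcGo coins i (j - 1) false)
    else
      if coins.getD i 0 < coins.getD (j - 1) 0 then calcGo coins (i + 1) j true
      else calcGo coins i (j - 1) true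
  else 0
termination_by j - i
decreasing_by all_goals omega

def calculate_alt (coins : List Int) (is_max : Bool) (alpha : Int) (beta : Int) : Int :=
  calcGo coins 0 coins.length is_max

-- ===== PRECONDITION & SPEC =====
def Spec_calculate (coins : List Int) (is_max : Bool) (alpha : Int) (beta : Int) (out : Int) : Prop := out = calculate_alt coins is_max alpha beta
instance (coins : List Int) (is_max : Bool) (alpha : Int) (beta : Int) (out : Int) : Decidable (Spec_calculate coins is_max alpha beta out) := by unfold Spec_calculate; infer_instance

-- ===== CLAIM (what is proved, stated in full; the proofs are below) =====
def Claim_equal_calculate : Prop := ∀ (coins : List Int) (is_max : Bool) (alpha : Int) (beta : Int), Dom_calculate coins is_max alpha beta → Spec_calculate coins is_max alpha beta (calculate coins is_max alpha beta)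

-- ===== LEMMAS AND PROOFS =====

lemma pv_take_dropLast (l : List Int) (n : Nat) (hn : n ≤ l.length) :
    (l.take n).dropLast = l.take (n - 1) := by
  apply List.ext_getElem
  · simp; omega
  · intro k h1 h2
    simp [List.getElem_dropLast, List.getElem_take]

lemma pv_slice_cons (l : List Int) (i j : Nat) (hij : i < j) (hj : j ≤ l.length) :
    (l.drop i).take (j - i) = l[i]'(by omega) :: (l.drop (i + 1)).take (j - (i + 1)) := by
  rw [List.drop_eq_getElem_cons (by omega)]
  have : j - i = (j - (i + 1)) + 1 := by omega
  rw [this, List.take_succ_cons]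

lemma pv_headI_slice (l : List Int) (i j : Nat) (hij : i < j) (hj : j ≤ l.length) :
    ((l.drop i).take (j - i)).headI = l.getD i 0 := by
  rw [pv_slice_cons l i j hij hj]
  simp [List.getD_eq_getElem?_getD, List.getElem?_eq_getElem (show i < l.length by omega)]

lemma pv_slice_len (l : List Int) (i j : Nat) (hj : j ≤ l.length) :
    ((l.drop i).take (j - i)).length = j - i := by
  simp; omega

lemma pv_getLastI_slice (l : List Int) (i j : Nat) (hij : i < j) (hj : j ≤ l.length) :
    ((l.drop i).take (j - i)).getLastI = l.getD (j - 1) 0 := by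
  have hlen := pv_slice_len l i j hj
  have hne : (l.drop i).take (j - i) ≠ [] := by
    intro hnil; rw [hnil] at hlen; simp at hlen; omega
  rw [List.getLastI_eq_getLast?_getD, List.getLast?_eq_getElem?]
  rw [hlen, List.getElem?_take, if_pos (by omega), List.getElem?_drop]
  have e1 : i + (j - i - 1) = j - 1 := by omega
  rw [e1]
  simp [List.getD_eq_getElem?_getD, List.getElem?_eq_getElem (show j - 1 < l.length by omega)]

lemma pv_tail_slice (l : List Int) (i j : Nat) (hij : i < j) (hj : j ≤ l.length) :
    ((l.drop i).take (j - i)).tail = (l.drop (i + 1)).take (j - (i + 1)) := by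
  rw [pv_slice_cons l i j hij hj]; rfl

lemma pv_dropLast_slice (l : List Int) (i j : Nat) (hij : i < j) (hj : j ≤ l.length) :
    ((l.drop i).take (j - i)).dropLast = (l.drop i).take (j - 1 - i) := by
  rw [pv_take_dropLast _ _ (by simp; omega)]
  congr 1; omega

lemma pv_main (coins : List Int) (alpha beta : Int) :
    ∀ (n i j : Nat) (turn : Bool), j ≤ coins.length → i ≤ j → j - i ≤ n →
      calculate ((coins.drop i).take (j - i)) turn alpha beta = calcGo coins i j turn := by
  intro n
  induction n with
  | zero =>
    intro i j turn hj hij hn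
    have hji : j = i := by omega
    subst hji
    simp [calculate, calcGo]
  | succ m ih =>
    intro i j turn hj hij hn
    by_cases hlt : i < j
    · have hne : (coins.drop i).take (j - i) ≠ [] := by
        intro hnil
        have := pv_slice_len coins i j hj
        rw [hnil] at this; simp at this; omega
      rw [calculate, dif_neg hne]
      rw [pv_headI_slice coins i j hlt hj, pv_getLastI_slice coins i j hlt hj,
          pv_tail_slice coins i j hlt hj, pv_dropLast_slice coins i j hlt hj]
      rw [calcGo, dif_pos hlt]
      cases turn with
      | true =>
        simp only [if_true]
        rw [ih (i+1) j false hj (by omega) (by omega)]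
        have : j - 1 - i = (j - 1) - i := rfl
        rw [ih i (j-1) false (by omega) (by omega) (by omega)]
        simp [ite_self]
      | false =>
        simp only [Bool.false_eq_true, if_false]
        rw [ih (i+1) j true hj (by omega) (by omega),
            ih i (j-1) true (by omega) (by omega) (by omega)]
    · have hji : j = i := by omega
      subst hji
      simp [calculate, calcGo]

-- ===== VERDICT (by name: the statement is the Claim_ definition above) =====
theorem calculate_spec : Claim_equal_calculate := by
  intro coins is_max alpha beta _
  unfold Spec_calculate calculate_alt
  have := pv_main coins alpha beta coins.length 0 coins.length is_max
    (le_refl _) (by omega) (by omega)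
  rw [← this]; congr 1; simp
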